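-- pv_equiv track=rewrite | github.com/satyamgupta53/python-collections | python-questions/finding_fraud_name_book.py | fake_name
-- ===== SOURCE A (Python) =====
-- def fake_name(book_name, arr) -> str:
--     book_name = book_name.lower()
--     for i in arr:
--         temp = ""
--         for j in book_name:
--             if (j == i[0]):
--                 temp += i[1]
--             elif (j == i[1]):
--                 temp += i[0]
--             else:
--                 temp += j
--         book_name = temp
--     return book_name
-- ===== SOURCE B (Python) =====
-- def fake_name(book_name, arr) -> str:
--     # Compose all swaps into one char->char map (to = forward image, frm = preimage),
--     # then apply it once per character of the lowercased name.
--     if not book_name: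
--         return ""
--     to = {}
--     frm = {}
--     for p in arr:
--         a, b = p[0], p[1]
--         pa = frm.get(a, a)
--         pb = frm.get(b, b)
--         to[pa] = b
--         to[pb] = a
--         frm[b] = pa
--         frm[a] = pb
--     return "".join(to.get(c, c) for c in book_name.lower())
-- ===== Notes on version B (the rewrite author's own statement) =====
-- stated objective: faster
-- what changed: Instead of rebuilding the whole string once per swap pair, B composes all swap pairs into a single char->char permutation map (maintaining the map and its inverse in two dicts, O(1) per pair) and applies it once per character of the lowercased name.
import Mathlib
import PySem

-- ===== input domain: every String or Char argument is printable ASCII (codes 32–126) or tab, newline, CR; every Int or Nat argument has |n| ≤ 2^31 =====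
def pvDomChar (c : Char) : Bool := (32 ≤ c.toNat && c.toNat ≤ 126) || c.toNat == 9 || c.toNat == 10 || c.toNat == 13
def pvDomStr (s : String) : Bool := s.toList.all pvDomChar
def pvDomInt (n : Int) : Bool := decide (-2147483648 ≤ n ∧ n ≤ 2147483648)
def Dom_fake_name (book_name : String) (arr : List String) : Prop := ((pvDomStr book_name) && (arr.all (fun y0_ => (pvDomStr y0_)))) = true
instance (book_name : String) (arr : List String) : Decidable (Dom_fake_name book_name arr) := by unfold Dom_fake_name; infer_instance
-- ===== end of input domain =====

-- B composes all swap pairs into one char->char map built in O(|arr|), then applies it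
-- once per character of the lowercased name, instead of rebuilding the whole string per pair.

-- ===== PORT A =====
-- inner loop of A: rebuild the string, swapping a and b
def fakeNameStepA (a b : Char) (bn : List Char) : List Char :=
  bn.foldl (fun temp j => temp ++ [if j = a then b else if j = b then a else j]) []

def fake_name (book_name : String) (arr : List String) : String :=
  String.ofList (arr.foldl
    (fun bn i =>
      match PySem.Str.pyGet? i 0, PySem.Str.pyGet? i 1 with
      | some a, some b => fakeNameStepA a b bn
      | _, _ => bn)  -- unreachable under Pre_ (Python raises IndexError there)
    (PySem.Chars.lower book_name.toList))

-- ===== PORT B =====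
-- one swap pair composed into the (forward, backward) dictionaries
def fakeNameStepB (st : PySem.Dict Char Char × PySem.Dict Char Char) (a b : Char) :
    PySem.Dict Char Char × PySem.Dict Char Char :=
  let pa := st.2.getD a a
  let pb := st.2.getD b b
  ((st.1.insert pa b).insert pb a, (st.2.insert b pa).insert a pb)

def fake_name_alt (book_name : String) (arr : List String) : String :=
  if book_name = "" then "" else
  let st := arr.foldl
    (fun st p =>
      match PySem.Str.pyGet? p 0 with
      | none => st  -- unreachable under Pre_
      | some a =>
        match PySem.Str.pyGet? p 1 with
        | none => st  -- unreachable under Pre_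
        | some b => fakeNameStepB st a b)
    (PySem.Dict.empty, PySem.Dict.empty)
  String.ofList ((PySem.Chars.lower book_name.toList).map (fun c => st.1.getD c c))

-- ===== PRECONDITION & SPEC =====
-- Pre_ excludes the inputs on which Python raises IndexError: a string of fewer than 2
-- characters in arr while book_name is nonempty (on an empty book_name the inner loop
-- never indexes into the pairs, so A returns "" regardless of arr).
def Pre_fake_name (book_name : String) (arr : List String) : Prop :=
  book_name = "" ∨ ∀ i ∈ arr, 2 ≤ i.toList.length

instance (book_name : String) (arr : List String) : Decidable (Pre_fake_name book_name arr) := by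
  unfold Pre_fake_name; infer_instance

def pvWitness_fake_name : String × List String := ("Harry", ["ar", "ys"])

def Spec_fake_name (book_name : String) (arr : List String) (out : String) : Prop :=
  out = fake_name_alt book_name arr
instance (book_name : String) (arr : List String) (out : String) : Decidable (Spec_fake_name book_name arr out) := by unfold Spec_fake_name; infer_instance

-- ===== CLAIM (what is proved, stated in full; the proofs are below) =====
def Claim_equal_fake_name : Prop := ∀ (book_name : String) (arr : List String), Dom_fake_name book_name arr → Pre_fake_name book_name arr → Spec_fake_name book_name arr (fake_name book_name arr)

-- ===== LEMMAS AND PROOFS =====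

-- the swap function of one pair
def fnSw (a b c : Char) : Char := if c = a then b else if c = b then a else c

theorem fnSw_invol (a b c : Char) : fnSw a b (fnSw a b c) = c := by
  unfold fnSw; split_ifs <;> simp_all

-- A's inner loop is a map of the swap over the characters
theorem fakeNameStepA_eq_map (a b : Char) (bn : List Char) :
    fakeNameStepA a b bn = bn.map (fnSw a b) := by
  unfold fakeNameStepA fnSw
  have := PySem.List.foldl_append_singleton_eq_map (fun j => if j = a then b else if j = b then a else j) bn []
  simpa using this

-- one B-step preserves the coupled invariant: the forward dict realises f, the
-- backward dict realises its inverse g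
theorem fakeNameStepB_inv (td bk : PySem.Dict Char Char) (f g : Char → Char)
    (a b : Char)
    (hto : ∀ x, td.getD x x = f x) (hfrm : ∀ y, bk.getD y y = g y)
    (hgf : ∀ x, g (f x) = x) (hfg : ∀ y, f (g y) = y) :
    (∀ x, (fakeNameStepB (td, bk) a b).1.getD x x = fnSw a b (f x)) ∧
    (∀ y, (fakeNameStepB (td, bk) a b).2.getD y y = g (fnSw a b y)) := by
  unfold fakeNameStepB
  simp only [hfrm]
  constructor
  · intro x
    rw [PySem.Dict.getD_insert, PySem.Dict.getD_insert, hto]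
    unfold fnSw
    by_cases hb : x = g b
    · subst hb; simp [hfg]; exact fun h => h.symm
    · simp only [if_neg hb]
      by_cases ha : x = g a
      · subst ha; simp [hfg]
      · simp only [if_neg ha]
        have h1 : f x ≠ a := fun h => ha (by rw [← h, hgf])
        have h2 : f x ≠ b := fun h => hb (by rw [← h, hgf])
        simp [h1, h2]
  · intro y
    rw [PySem.Dict.getD_insert, PySem.Dict.getD_insert, hfrm]
    unfold fnSw
    by_cases hya : y = a
    · subst hya; simp
    · simp only [if_neg hya]
      by_cases hyb : y = b
      · subst hyb; simp
      · simp [hyb]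

-- master invariant over the whole array
theorem fake_name_master (arr : List String)
    (hpre : ∀ i ∈ arr, 2 ≤ i.toList.length) :
    ∀ (td bk : PySem.Dict Char Char) (f g : Char → Char),
    (∀ x, td.getD x x = f x) → (∀ y, bk.getD y y = g y) →
    (∀ x, g (f x) = x) → (∀ y, f (g y) = y) →
    ∀ bn : List Char,
      arr.foldl
        (fun bn i =>
          match PySem.Str.pyGet? i 0, PySem.Str.pyGet? i 1 with
          | some a, some b => fakeNameStepA a b bn
          | _, _ => bn) (bn.map f)
      = bn.map (fun c =>
          (arr.foldl
            (fun st p =>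
              match PySem.Str.pyGet? p 0 with
              | none => st
              | some a =>
                match PySem.Str.pyGet? p 1 with
                | none => st
                | some b => fakeNameStepB st a b) (td, bk)).1.getD c c) := by
  induction arr with
  | nil =>
    intro td bk f g hto _ _ _ bn
    simp [List.foldl_nil]
    intro c _
    exact (hto c).symm
  | cons i rest ih =>
    intro td bk f g hto hfrm hgf hfg bn
    have hi : 2 ≤ i.toList.length := hpre i (List.mem_cons_self ..)
    have ha : PySem.Str.pyGet? i 0 = some (i.toList[0]'(by omega)) := by
      rw [show PySem.Str.pyGet? i 0 = PySem.List.pyGet? i.toList 0 from by simp [PySem.Str.pyGet?]]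
      exact PySem.List.pyGet?_ofNat i.toList 0 (by omega)
    have hb : PySem.Str.pyGet? i 1 = some (i.toList[1]'(by omega)) := by
      rw [show PySem.Str.pyGet? i 1 = PySem.List.pyGet? i.toList 1 from by simp [PySem.Str.pyGet?]]
      exact PySem.List.pyGet?_ofNat i.toList 1 (by omega)
    set a := i.toList[0]'(by omega)
    set b := i.toList[1]'(by omega)
    simp only [List.foldl_cons, ha, hb]
    rw [fakeNameStepA_eq_map, List.map_map]
    obtain ⟨h1, h2⟩ := fakeNameStepB_inv td bk f g a b hto hfrm hgf hfg
    have := ih (fun j hj => hpre j (List.mem_cons_of_mem _ hj))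
      (fakeNameStepB (td, bk) a b).1 (fakeNameStepB (td, bk) a b).2
      (fun c => fnSw a b (f c)) (fun c => g (fnSw a b c))
      h1 h2
      (fun x => by simp only []; rw [fnSw_invol, hgf])
      (fun y => by simp only []; rw [hfg, fnSw_invol])
      bn
    simpa using this

-- when the (lowered) name is empty, A's fold keeps the empty list
theorem fake_name_foldlA_nil (arr : List String) :
    arr.foldl
      (fun bn i =>
        match PySem.Str.pyGet? i 0, PySem.Str.pyGet? i 1 with
        | some a, some b => fakeNameStepA a b bn
        | _, _ => bn) ([] : List Char) = [] := by
  induction arr with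
  | nil => rfl
  | cons i rest ih =>
    simp only [List.foldl_cons]
    cases PySem.Str.pyGet? i 0 with
    | none => simpa using ih
    | some a =>
      cases PySem.Str.pyGet? i 1 with
      | none => simpa using ih
      | some b => simpa [fakeNameStepA] using ih

-- ===== VERDICT (by name: the statement is the Claim_ definition above) =====
theorem fake_name_spec : Claim_equal_fake_name := by
  intro book_name arr _hdom hpre
  unfold Spec_fake_name fake_name fake_name_alt
  by_cases hempty : book_name = ""
  · subst hempty
    rw [show PySem.Chars.lower "".toList = ([] : List Char) from rfl]
    rw [fake_name_foldlA_nil]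
    rfl
  · rw [if_neg hempty]
    replace hpre : ∀ i ∈ arr, 2 ≤ i.toList.length := hpre.resolve_left hempty
    have h := fake_name_master arr hpre PySem.Dict.empty PySem.Dict.empty
      (fun c => c) (fun c => c)
      (fun x => by simp [PySem.Dict.getD_empty])
      (fun y => by simp [PySem.Dict.getD_empty])
      (fun _ => rfl) (fun _ => rfl)
      (PySem.Chars.lower book_name.toList)
    simp only [List.map_id'] at h
    rw [h]
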